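-- pv_equiv track=rewrite | github.com/alexfarouz/Python-Projects | Project-4/afarouz_201_PA4.py | compute
-- ===== SOURCE A (Python) =====
-- def compute(lst1, lst2, lst3):
--     new_list = []
--     for j in range(len(lst1)):
--         for k in range(len(lst2)):
--             for l in range(len(lst3)):
--                 if j == k and j == l and lst3[l] == True:
--                     new_list.append(lst1[j] + lst2[k])
--                     break
--                 elif j == k and j == l and lst3[l] == False:
--                     new_list.append(lst1[j] - lst2[k])
--                     break
--
--     return new_list
-- ===== SOURCE B (Python) =====
-- def compute(lst1, lst2, lst3):
--     # One pass over the three lists in parallel, up to the shortest length.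
--     return [a + b if f else a - b for a, b, f in zip(lst1, lst2, lst3)]
-- ===== Notes on version B (the rewrite author's own statement) =====
-- stated objective: faster
-- what changed: Replaces the triple nested index loop (which only ever fires on the diagonal j==k==l) by a single parallel pass with zip over the three lists up to the shortest length.
import Mathlib
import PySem

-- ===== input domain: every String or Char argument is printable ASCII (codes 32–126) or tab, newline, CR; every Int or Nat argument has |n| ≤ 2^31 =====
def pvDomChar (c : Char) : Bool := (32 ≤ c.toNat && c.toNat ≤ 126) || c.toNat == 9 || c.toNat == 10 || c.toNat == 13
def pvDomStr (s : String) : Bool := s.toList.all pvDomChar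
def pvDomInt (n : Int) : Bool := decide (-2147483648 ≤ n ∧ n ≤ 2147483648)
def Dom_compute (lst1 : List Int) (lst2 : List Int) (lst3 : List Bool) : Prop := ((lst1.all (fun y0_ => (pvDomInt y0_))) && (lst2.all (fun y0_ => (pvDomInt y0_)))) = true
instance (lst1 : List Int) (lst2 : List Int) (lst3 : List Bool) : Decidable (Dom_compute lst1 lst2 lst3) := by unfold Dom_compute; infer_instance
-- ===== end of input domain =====

-- B replaces A's triple nested index loop by a single parallel pass over the three lists (asymptotically faster).

-- ===== PORT A =====
-- inner 'for l in range(len(lst3))' loop with its break: returns the element appended (if any)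
def computeInnerL (lst1 : List Int) (lst2 : List Int) (lst3 : List Bool) (j k : Int) : List Int → Option Int
  | [] => none
  | l :: ls =>
    if j = k ∧ j = l ∧ PySem.List.pyGetD lst3 l false = true then
      some (PySem.List.pyGetD lst1 j 0 + PySem.List.pyGetD lst2 k 0)
    else if j = k ∧ j = l ∧ PySem.List.pyGetD lst3 l false = false then
      some (PySem.List.pyGetD lst1 j 0 - PySem.List.pyGetD lst2 k 0)
    else
      computeInnerL lst1 lst2 lst3 j k ls

def compute (lst1 : List Int) (lst2 : List Int) (lst3 : List Bool) : List Int :=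
  (PySem.List.pyRange 0 (lst1.length : Int) 1).foldl (fun acc j =>
    (PySem.List.pyRange 0 (lst2.length : Int) 1).foldl (fun acc2 k =>
      match computeInnerL lst1 lst2 lst3 j k (PySem.List.pyRange 0 (lst3.length : Int) 1) with
      | some v => acc2 ++ [v]
      | none => acc2) acc) []

-- ===== PORT B =====
def compute_alt : List Int → List Int → List Bool → List Int
  | a :: as_, b :: bs, f :: fs => (if f then a + b else a - b) :: compute_alt as_ bs fs
  | _, _, _ => []

-- ===== PRECONDITION & SPEC =====
def Spec_compute (lst1 : List Int) (lst2 : List Int) (lst3 : List Bool) (out : List Int) : Prop := out = compute_alt lst1 lst2 lst3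
instance (lst1 : List Int) (lst2 : List Int) (lst3 : List Bool) (out : List Int) : Decidable (Spec_compute lst1 lst2 lst3 out) := by unfold Spec_compute; infer_instance

-- ===== CLAIM (what is proved, stated in full; the proofs are below) =====
def Claim_equal_compute : Prop := ∀ (lst1 : List Int) (lst2 : List Int) (lst3 : List Bool), Dom_compute lst1 lst2 lst3 → Spec_compute lst1 lst2 lst3 (compute lst1 lst2 lst3)

-- ===== LEMMAS AND PROOFS =====

-- the value appended on diagonal index j
def pvVal (lst1 : List Int) (lst2 : List Int) (lst3 : List Bool) (j : Int) : Int :=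
  if PySem.List.pyGetD lst3 j false then
    PySem.List.pyGetD lst1 j 0 + PySem.List.pyGetD lst2 j 0
  else
    PySem.List.pyGetD lst1 j 0 - PySem.List.pyGetD lst2 j 0

lemma computeInnerL_eq (lst1 : List Int) (lst2 : List Int) (lst3 : List Bool) (j k : Int)
    (ls : List Int) :
    computeInnerL lst1 lst2 lst3 j k ls
      = if j = k ∧ j ∈ ls then some (pvVal lst1 lst2 lst3 j) else none := by
  induction ls with
  | nil => simp [computeInnerL]
  | cons l ls ih =>
    simp only [computeInnerL]
    by_cases hjk : j = k
    · subst hjk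
      by_cases hjl : j = l
      · subst hjl
        cases h3 : PySem.List.pyGetD lst3 j false <;> simp [h3, pvVal]
      · simp [hjl, ih]
    · simp [hjk, ih]

lemma flatMap_ite_singleton_of_nodup {α : Type} [DecidableEq α] (j : α) (L : List Int)
    (ks : List α) (hnd : ks.Nodup) :
    (ks.flatMap (fun k => if j = k then L else [])) = if j ∈ ks then L else [] := by
  induction ks with
  | nil => simp
  | cons k ks ih =>
    rcases List.nodup_cons.mp hnd with ⟨hk, hnd'⟩
    by_cases hj : j = k
    · subst hj
      simp [List.flatMap_cons, ih hnd', hk]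
    · simp [List.flatMap_cons, hj, ih hnd']

lemma compute_eq_flatMap (lst1 : List Int) (lst2 : List Int) (lst3 : List Bool) :
    compute lst1 lst2 lst3
      = (PySem.List.pyRange 0 (lst1.length : Int) 1).flatMap (fun j =>
          if j ∈ PySem.List.pyRange 0 (lst2.length : Int) 1 ∧
             j ∈ PySem.List.pyRange 0 (lst3.length : Int) 1 then
            [pvVal lst1 lst2 lst3 j]
          else []) := by
  unfold compute
  have hmid : ∀ (j : Int) (acc : List Int),
      (PySem.List.pyRange 0 (lst2.length : Int) 1).foldl (fun acc2 k =>
        match computeInnerL lst1 lst2 lst3 j k (PySem.List.pyRange 0 (lst3.length : Int) 1) with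
        | some v => acc2 ++ [v]
        | none => acc2) acc
      = acc ++ (if j ∈ PySem.List.pyRange 0 (lst2.length : Int) 1 ∧
                   j ∈ PySem.List.pyRange 0 (lst3.length : Int) 1 then
                  [pvVal lst1 lst2 lst3 j]
                else []) := by
    intro j acc
    have hstep : (fun (acc2 : List Int) (k : Int) =>
        match computeInnerL lst1 lst2 lst3 j k (PySem.List.pyRange 0 (lst3.length : Int) 1) with
        | some v => acc2 ++ [v]
        | none => acc2)
      = fun acc2 k => acc2 ++ (if j = k then
          (if j ∈ PySem.List.pyRange 0 (lst3.length : Int) 1 then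
            [pvVal lst1 lst2 lst3 j] else []) else []) := by
      funext acc2 k
      rw [computeInnerL_eq]
      by_cases hjk : j = k
      · by_cases h3 : j ∈ PySem.List.pyRange 0 (lst3.length : Int) 1
        · rw [if_pos ⟨hjk, h3⟩, if_pos hjk, if_pos h3]
        · rw [if_neg (by tauto), if_pos hjk, if_neg h3]; simp
      · rw [if_neg (by tauto), if_neg hjk]; simp
    rw [hstep, PySem.List.foldl_append_eq_flatMap,
        flatMap_ite_singleton_of_nodup _ _ _ (PySem.List.nodup_pyRange_one 0 (lst2.length : Int))]
    by_cases h2 : j ∈ PySem.List.pyRange 0 (lst2.length : Int) 1 <;>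
      by_cases h3 : j ∈ PySem.List.pyRange 0 (lst3.length : Int) 1 <;>
        simp [h2, h3]
  have hfun : (fun (acc : List Int) (j : Int) =>
      (PySem.List.pyRange 0 (lst2.length : Int) 1).foldl (fun acc2 k =>
        match computeInnerL lst1 lst2 lst3 j k (PySem.List.pyRange 0 (lst3.length : Int) 1) with
        | some v => acc2 ++ [v]
        | none => acc2) acc)
      = fun acc j => acc ++ (if j ∈ PySem.List.pyRange 0 (lst2.length : Int) 1 ∧
             j ∈ PySem.List.pyRange 0 (lst3.length : Int) 1 then
            [pvVal lst1 lst2 lst3 j] else []) := by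
    funext acc j
    exact hmid j acc
  rw [hfun, PySem.List.foldl_append_eq_flatMap]
  simp

lemma compute_eq_natForm (lst1 : List Int) (lst2 : List Int) (lst3 : List Bool) :
    compute lst1 lst2 lst3
      = (List.range lst1.length).flatMap (fun k =>
          if k < lst2.length ∧ k < lst3.length then
            [if lst3.getD k false then lst1.getD k 0 + lst2.getD k 0
             else lst1.getD k 0 - lst2.getD k 0]
          else []) := by
  rw [compute_eq_flatMap, PySem.List.pyRange_zero_nat lst1.length, List.flatMap_map]
  apply List.flatMap_congr
  intro k _
  have hm2 : ((k : Int) ∈ PySem.List.pyRange 0 (lst2.length : Int) 1) ↔ k < lst2.length := by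
    rw [PySem.List.mem_pyRange_one]
    omega
  have hm3 : ((k : Int) ∈ PySem.List.pyRange 0 (lst3.length : Int) 1) ↔ k < lst3.length := by
    rw [PySem.List.mem_pyRange_one]
    omega
  simp [hm2, hm3, pvVal, PySem.List.pyGetD_natCast]

theorem compute_eq_alt (lst1 : List Int) (lst2 : List Int) (lst3 : List Bool) :
    compute lst1 lst2 lst3 = compute_alt lst1 lst2 lst3 := by
  rw [compute_eq_natForm]
  induction lst1 generalizing lst2 lst3 with
  | nil => cases lst2 <;> cases lst3 <;> simp [compute_alt]
  | cons a as ih =>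
    cases lst2 with
    | nil => simp [compute_alt]
    | cons b bs =>
      cases lst3 with
      | nil => simp [compute_alt]
      | cons f fs =>
        simp only [List.length_cons]
        rw [List.range_succ_eq_map, List.flatMap_cons, List.flatMap_map]
        simp only [List.getD_cons_zero, List.getD_cons_succ,
          Nat.succ_lt_succ_iff, Nat.zero_lt_succ, and_self, if_pos]
        rw [compute_alt]
        simpa [List.getD_eq_getElem?_getD] using ih bs fs

-- ===== VERDICT (by name: the statement is the Claim_ definition above) =====
theorem compute_spec : Claim_equal_compute := by
  intro lst1 lst2 lst3 _
  unfold Spec_compute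
  exact compute_eq_alt lst1 lst2 lst3
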